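-- pv_equiv track=rewrite | github.com/pandoramuses/Custom-Info-Check | tags/定制信息文本替换.py | text_replace
-- ===== SOURCE A (Python) =====
-- def text_replace(x, replace_dict):
--     x = x.replace("\r\n", "\r").replace("\n", "\r")
--     part_text_list = x.split("\r")
--     replaced_parts = []
--     for part_text in part_text_list:
--         replaced_text = part_text.strip()
--         for key, value in replace_dict.items():
--             if key == replaced_text:  # 检查是否存在key，减少不必要的操作
--                 replaced_text = value
--         replaced_parts.append(replaced_text)
--     # 使用分隔符重新连接
--     return "\r".join(replaced_parts)
-- ===== SOURCE B (Python) =====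
-- def text_replace(x, replace_dict):
--     x = x.replace("\r\n", "\r").replace("\n", "\r")
--     # Resolve chains once: build, in reverse dict order, a table mapping each
--     # key to the result of applying all later-ordered rules to its value.
--     resolved = {}
--     for key, value in reversed(list(replace_dict.items())):
--         resolved[key] = resolved.get(value, value)
--     parts = []
--     for part_text in x.split("\r"):
--         stripped = part_text.strip()
--         parts.append(resolved.get(stripped, stripped))
--     return "\r".join(parts)
-- ===== Notes on version B (the rewrite author's own statement) =====
-- stated objective: alternative
-- what changed: A rescans the whole replace_dict for every line; B instead builds, in one reverse-order pass over the dict, a chain-resolved lookup table and then maps each stripped line through a single dict lookup.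
import Mathlib
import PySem

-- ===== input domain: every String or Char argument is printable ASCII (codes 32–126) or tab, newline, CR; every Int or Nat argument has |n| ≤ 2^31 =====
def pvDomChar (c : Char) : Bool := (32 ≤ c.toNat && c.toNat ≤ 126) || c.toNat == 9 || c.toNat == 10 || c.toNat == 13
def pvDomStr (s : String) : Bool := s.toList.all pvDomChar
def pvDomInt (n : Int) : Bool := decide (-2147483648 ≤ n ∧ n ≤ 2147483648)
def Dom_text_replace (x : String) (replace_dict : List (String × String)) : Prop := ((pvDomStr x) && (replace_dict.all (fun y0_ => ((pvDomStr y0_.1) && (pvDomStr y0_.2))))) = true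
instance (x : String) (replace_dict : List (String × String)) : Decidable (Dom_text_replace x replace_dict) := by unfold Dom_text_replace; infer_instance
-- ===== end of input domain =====

-- B replaces A's per-line scan of the whole replace_dict by a single reverse-order pass
-- building a chain-resolved lookup table, then one dict lookup per line (objective: alternative).


-- ===== PORT A =====
def text_replace (x : String) (replace_dict : List (String × String)) : String :=
  let x1 := PySem.Str.replace (PySem.Str.replace x "\r\n" "\r") "\n" "\r"
  let part_text_list := (PySem.Str.split? x1 "\r").getD []   -- sep = "\r" ≠ "", so split? is 'some'
  let replaced_parts := part_text_list.foldl (fun acc part_text =>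
    acc ++ [replace_dict.foldl (fun replaced_text kv =>
      if kv.1 == replaced_text then kv.2 else replaced_text) (PySem.Str.strip part_text)]) []
  PySem.Str.join "\r" replaced_parts

-- ===== PORT B =====
def text_replace_alt (x : String) (replace_dict : List (String × String)) : String :=
  let x1 := PySem.Str.replace (PySem.Str.replace x "\r\n" "\r") "\n" "\r"
  let resolved := replace_dict.reverse.foldl
    (fun t kv => t.insert kv.1 (t.getD kv.2 kv.2)) (PySem.Dict.empty : PySem.Dict String String)
  let parts := (PySem.Str.split? x1 "\r").getD []   -- sep = "\r" ≠ "", so split? is 'some'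
  let out := parts.foldl (fun acc part_text =>
    let stripped := PySem.Str.strip part_text
    acc ++ [resolved.getD stripped stripped]) []
  PySem.Str.join "\r" out

-- ===== PRECONDITION & SPEC =====
def Spec_text_replace (x : String) (replace_dict : List (String × String)) (out : String) : Prop := out = text_replace_alt x replace_dict
instance (x : String) (replace_dict : List (String × String)) (out : String) : Decidable (Spec_text_replace x replace_dict out) := by unfold Spec_text_replace; infer_instance

-- ===== CLAIM (what is proved, stated in full; the proofs are below) =====
def Claim_equal_text_replace : Prop := ∀ (x : String) (replace_dict : List (String × String)), Dom_text_replace x replace_dict → Spec_text_replace x replace_dict (text_replace x replace_dict)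

-- ===== LEMMAS AND PROOFS =====

-- A's inner scan of the dict equals one lookup in B's reverse-built resolved table.
lemma scan_eq_resolved (d : List (String × String)) (s : String) :
    d.foldl (fun replaced_text kv => if kv.1 == replaced_text then kv.2 else replaced_text) s
    = (d.reverse.foldl (fun t kv => t.insert kv.1 (t.getD kv.2 kv.2))
        (PySem.Dict.empty : PySem.Dict String String)).getD s s := by
  induction d generalizing s with
  | nil => simp [PySem.Dict.getD_empty]
  | cons kv rest ih =>
    rw [List.reverse_cons, List.foldl_append]
    simp only [List.foldl_cons, List.foldl_nil]
    rw [PySem.Dict.getD_insert]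
    by_cases h : s = kv.1
    · subst h; simp only [beq_self_eq_true, if_pos]
      exact ih kv.2
    · rw [if_neg (by simpa using fun e => h e.symm), if_neg h]
      exact ih s

theorem text_replace_spec : Claim_equal_text_replace := by
  intro x d _
  unfold Spec_text_replace text_replace text_replace_alt
  simp only [PySem.List.foldl_append_singleton_eq_map, List.nil_append]
  exact congrArg (PySem.Str.join "\r")
    (List.map_congr_left (fun p _ => scan_eq_resolved d (PySem.Str.strip p)))
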